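-- pv_equiv track=rewrite | github.com/yuyilei/Pat_python | 1054-2.py | tell_minus
-- ===== SOURCE A (Python) =====
-- def tell_minus(n) :
--     if '-' in n :
--         char = [i for i in n ]
--         if char.count('-') > 1 :
--             return False
--         else :
--             if char[0] != '-' :
--                 return False
--             else :
--                 return True
--     else :
--         return True
-- ===== SOURCE B (Python) =====
-- def tell_minus(n):
--     return '-' not in n[1:]
-- ===== Notes on version B (the rewrite author's own statement) =====
-- stated objective: simpler
-- what changed: Replaces the list-materialisation, dash count and first-char branching with a single membership test: valid iff no minus sign occurs after the first character.
import Mathlib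
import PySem

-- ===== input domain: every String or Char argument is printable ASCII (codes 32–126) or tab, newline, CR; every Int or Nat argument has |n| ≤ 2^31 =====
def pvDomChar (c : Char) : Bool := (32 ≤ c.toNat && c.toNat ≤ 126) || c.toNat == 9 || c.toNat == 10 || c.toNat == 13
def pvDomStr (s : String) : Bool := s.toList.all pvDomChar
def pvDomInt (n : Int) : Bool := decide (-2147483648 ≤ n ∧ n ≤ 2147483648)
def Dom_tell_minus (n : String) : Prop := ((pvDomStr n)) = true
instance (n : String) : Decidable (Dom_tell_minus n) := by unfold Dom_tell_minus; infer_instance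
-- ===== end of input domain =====

-- ===== PORT A =====
-- B replaces the count-and-branch logic with a single membership test on the tail; objective: simpler.
def tell_minus (n : String) : Bool :=
  if '-' ∈ n.toList then
    let char := n.toList.map (fun i => i)
    if PySem.List.count char '-' > 1 then false
    else
      -- char[0]: char is nonempty here since '-' ∈ char, so the [] case is unreachable
      match char with
      | [] => true
      | c :: _ => if c ≠ '-' then false else true
  else true

-- ===== PORT B =====
def tell_minus_alt (n : String) : Bool :=
  decide ('-' ∉ PySem.List.slice n.toList (some 1) none)

-- ===== PRECONDITION & SPEC =====
def Spec_tell_minus (n : String) (out : Bool) : Prop := out = tell_minus_alt n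
instance (n : String) (out : Bool) : Decidable (Spec_tell_minus n out) := by unfold Spec_tell_minus; infer_instance

-- ===== CLAIM (what is proved, stated in full; the proofs are below) =====
def Claim_equal_tell_minus : Prop := ∀ (n : String), Dom_tell_minus n → Spec_tell_minus n (tell_minus n)

-- ===== LEMMAS AND PROOFS =====

-- ===== VERDICT (by name: the statement is the Claim_ definition above) =====
theorem tell_minus_spec : Claim_equal_tell_minus := by
  intro n _
  unfold Spec_tell_minus tell_minus tell_minus_alt
  rw [PySem.List.slice_from_one]
  cases h : n.toList with
  | nil => simp
  | cons c cs =>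
    by_cases hc : c = '-' <;>
      simp [PySem.List.count_eq, hc, List.count_pos_iff]
    exact fun _ e => hc e.symm
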